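-- pv_equiv track=rewrite | github.com/queelius/computational-explorations | src/cycle_spectrum.py | find_alternating_path_bt
-- ===== SOURCE A (Python) =====
-- from typing import Set, List, Tuple, Optional
--
-- def find_alternating_path_bt(E_list: List[int], T_list: List[int],
--                              start_e: int, target_k: int,
--                              adj_et: dict, adj_te: dict,
--                              end_set: Optional[Set[int]] = None) -> bool:
--     """Backtracking search for alternating path of length 2k.
--
--     More thorough than greedy — backtracks on failure.
--     Returns True if a path exists (doesn't return the path itself for speed).
--     """
--     used_E = {start_e}
--     used_T = set()
--
--     def _bt(current_e: int, depth: int) -> bool: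
--         if depth == target_k:
--             return True
--         # Try each T-neighbor of current_e
--         t_candidates = adj_et.get(current_e, [])
--         for t in t_candidates:
--             if t in used_T:
--                 continue
--             # Last step: check end constraint
--             if depth == target_k - 1 and end_set is not None and t not in end_set:
--                 continue
--             used_T.add(t)
--             if depth == target_k - 1:
--                 used_T.discard(t)
--                 return True
--             # Try each E-neighbor of t
--             e_candidates = adj_te.get(t, [])
--             for e in e_candidates:
--                 if e in used_E:
--                     continue
--                 used_E.add(e)
--                 if _bt(e, depth + 1):
--                     used_E.discard(e)
--                     used_T.discard(t)
--                     return True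
--                 used_E.discard(e)
--             used_T.discard(t)
--         return False
--
--     return _bt(start_e, 0)
-- ===== SOURCE B (Python) =====
-- from typing import Set, List, Tuple, Optional
--
-- def find_alternating_path_bt(E_list: List[int], T_list: List[int],
--                              start_e: int, target_k: int,
--                              adj_et: dict, adj_te: dict,
--                              end_set: Optional[Set[int]] = None) -> bool:
--     """Iterative DFS with an explicit stack of frames instead of recursion.
--
--     Each frame holds the worklist of remaining flattened (t, e2) half-step
--     moves from its vertex plus the move taken to reach it (for unmarking on
--     pop); used_E/used_T are updated when a move is taken and undone when a
--     frame is popped or a final-level probe fails.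
--     """
--     if target_k <= 0:
--         return target_k == 0
--
--     def ok_end(t):
--         return end_set is None or t in end_set
--
--     if target_k == 1:
--         return any(ok_end(t) for t in adj_et.get(start_e, []))
--
--     used_E = {start_e}
--     used_T = set()
--
--     def moves(e):
--         return [(t, e2) for t in adj_et.get(e, []) if t not in used_T
--                 for e2 in adj_te.get(t, []) if e2 not in used_E]
--
--     stack = [[moves(start_e), None]]
--     while stack:
--         pend, back = stack[-1]
--         if not pend:
--             stack.pop()
--             if back is not None:
--                 used_T.discard(back[0])
--                 used_E.discard(back[1])
--             continue
--         t, e2 = pend.pop(0)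
--         used_T.add(t)
--         used_E.add(e2)
--         if target_k - len(stack) == 1:
--             if any(t2 not in used_T and ok_end(t2) for t2 in adj_et.get(e2, [])):
--                 return True
--             used_T.discard(t)
--             used_E.discard(e2)
--         else:
--             stack.append([moves(e2), (t, e2)])
--     return False
-- ===== Notes on version B (the rewrite author's own statement) =====
-- stated objective: alternative
-- what changed: The recursive backtracking with nested per-level loops is replaced by an iterative engine: an explicit stack of frames, each holding the worklist of flattened (t,e2) half-step moves from its vertex and the move taken to reach it, with used_E/used_T marked when a move is taken and unmarked on pop or on a failed final-level probe; nonpositive and k==1 targets are settled up front without the engine.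
import Mathlib
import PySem

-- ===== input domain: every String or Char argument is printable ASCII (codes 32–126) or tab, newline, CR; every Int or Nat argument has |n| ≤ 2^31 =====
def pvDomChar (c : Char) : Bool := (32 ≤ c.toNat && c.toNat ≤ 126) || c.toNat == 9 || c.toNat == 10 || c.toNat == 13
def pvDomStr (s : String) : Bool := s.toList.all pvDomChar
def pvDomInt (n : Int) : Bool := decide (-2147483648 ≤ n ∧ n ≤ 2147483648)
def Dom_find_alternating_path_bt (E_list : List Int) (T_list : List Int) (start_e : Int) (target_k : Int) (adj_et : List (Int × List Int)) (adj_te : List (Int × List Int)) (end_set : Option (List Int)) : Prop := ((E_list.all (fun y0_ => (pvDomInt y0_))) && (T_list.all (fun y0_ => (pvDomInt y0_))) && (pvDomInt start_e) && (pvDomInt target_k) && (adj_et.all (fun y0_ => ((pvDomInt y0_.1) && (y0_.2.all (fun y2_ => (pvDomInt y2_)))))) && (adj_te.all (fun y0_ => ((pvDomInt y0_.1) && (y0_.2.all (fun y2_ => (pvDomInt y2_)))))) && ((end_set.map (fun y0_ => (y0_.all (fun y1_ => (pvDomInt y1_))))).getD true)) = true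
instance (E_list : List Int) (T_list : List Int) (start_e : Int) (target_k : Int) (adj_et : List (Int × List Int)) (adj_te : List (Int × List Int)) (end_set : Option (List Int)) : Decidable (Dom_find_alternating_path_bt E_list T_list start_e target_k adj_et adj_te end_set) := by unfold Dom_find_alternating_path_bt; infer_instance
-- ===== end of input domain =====

-- B replaces A's recursive backtracking by an explicit stack-based iterative DFS over the same
-- search tree (frames of flattened (t,e2) half-step moves, marks undone on pop); an alternative
-- decomposition of the same cost, not a speed claim.

-- ===== PORT A =====
-- In Python A the shared sets used_E/used_T are restored to their entry state on every return
-- path of _bt (each add is matched by a discard before any return), so this port threads the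
-- two sets functionally; the used_T.add/discard pair around the last-step `return True` cancels.
-- The fuel argument only makes the mutual recursion total: each descent marks a fresh element
-- of adj_te's value lists in used_E, so the recursion depth never exceeds the total length of
-- those lists and fuel = that length + 1 is never exhausted.
def pvEndBlocks (end_set : Option (List Int)) (t : Int) : Bool :=
  match end_set with
  | some s => !s.contains t
  | none => false

mutual
def pvBtA (adj_et adj_te : List (Int × List Int)) (end_set : Option (List Int))
    (target_k : Int) : Nat → List Int → List Int → Int → Int → Bool
  | 0, _, _, _, _ => false
  | fuel+1, usedE, usedT, current_e, depth =>
    if depth = target_k then true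
    else pvLoopT adj_et adj_te end_set target_k fuel usedE usedT depth
           (PySem.Dict.getD ⟨adj_et⟩ current_e [])
termination_by fuel usedE usedT current_e depth => (fuel, 0, 0)

def pvLoopT (adj_et adj_te : List (Int × List Int)) (end_set : Option (List Int))
    (target_k : Int) (fuel : Nat) (usedE usedT : List Int) (depth : Int) :
    List Int → Bool
  | [] => false
  | t :: ts =>
    if usedT.contains t then
      pvLoopT adj_et adj_te end_set target_k fuel usedE usedT depth ts
    else if depth = target_k - 1 ∧ pvEndBlocks end_set t = true then
      pvLoopT adj_et adj_te end_set target_k fuel usedE usedT depth ts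
    else if depth = target_k - 1 then true
    else if pvLoopE adj_et adj_te end_set target_k fuel usedE (PySem.Set.add usedT t) depth
              (PySem.Dict.getD ⟨adj_te⟩ t []) then true
    else pvLoopT adj_et adj_te end_set target_k fuel usedE usedT depth ts
termination_by ts => (fuel, 2, ts.length)

def pvLoopE (adj_et adj_te : List (Int × List Int)) (end_set : Option (List Int))
    (target_k : Int) (fuel : Nat) (usedE usedT : List Int) (depth : Int) :
    List Int → Bool
  | [] => false
  | e :: es =>
    if usedE.contains e then
      pvLoopE adj_et adj_te end_set target_k fuel usedE usedT depth es
    else if pvBtA adj_et adj_te end_set target_k fuel (PySem.Set.add usedE e) usedT e (depth + 1) then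
      true
    else pvLoopE adj_et adj_te end_set target_k fuel usedE usedT depth es
termination_by es => (fuel, 1, es.length)
end

def find_alternating_path_bt (E_list : List Int) (T_list : List Int) (start_e : Int) (target_k : Int) (adj_et : List (Int × List Int)) (adj_te : List (Int × List Int)) (end_set : Option (List Int)) : Bool :=
  pvBtA adj_et adj_te end_set target_k
    ((adj_te.flatMap (fun p => p.2)).length + 1) [start_e] [] start_e 0

-- ===== PORT B =====
def pvOkEnd (end_set : Option (List Int)) (t : Int) : Bool :=
  match end_set with
  | none => true
  | some s => s.contains t

-- `any(t2 not in used_T and ok_end(t2) for t2 in adj_et.get(e2, []))`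
def pvLastCheck (adj_et : List (Int × List Int)) (end_set : Option (List Int))
    (usedT : List Int) (e2 : Int) : Bool :=
  (PySem.Dict.getD ⟨adj_et⟩ e2 []).any (fun t2 => !usedT.contains t2 && pvOkEnd end_set t2)

-- `[(t, e2) for t in adj_et.get(e, []) if t not in used_T for e2 in adj_te.get(t, []) if e2 not in used_E]`
def pvMovesB (adj_et adj_te : List (Int × List Int)) (usedT usedE : List Int) (e : Int) :
    List (Int × Int) :=
  (PySem.Dict.getD ⟨adj_et⟩ e []).flatMap (fun t =>
    if usedT.contains t then []
    else ((PySem.Dict.getD ⟨adj_te⟩ t []).filter (fun e2 => !usedE.contains e2)).map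
           (fun e2 => (t, e2)))

-- Source B's while loop, one fuel unit per iteration.  The fuel passed at the top
-- (pvCostB) is by construction at least the number of iterations the loop performs
-- (pvRunB_sim below proves the exhaustion branch is never the one that answers).
def pvRunB (adj_et adj_te : List (Int × List Int)) (end_set : Option (List Int)) (target_k : Int) :
    Nat → List (List (Int × Int) × Option (Int × Int)) → List Int → List Int → Bool
  | 0, _, _, _ => false
  | _+1, [], _, _ => false
  | fuel+1, (pend, back) :: rest, usedE, usedT =>
    match pend with
    | [] =>
      match back with
      | none => pvRunB adj_et adj_te end_set target_k fuel rest usedE usedT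
      | some (bt, be) =>
        pvRunB adj_et adj_te end_set target_k fuel rest
          (PySem.Set.discard usedE be) (PySem.Set.discard usedT bt)
    | (t, e2) :: pend' =>
      let usedT' := PySem.Set.add usedT t
      let usedE' := PySem.Set.add usedE e2
      if target_k - ((rest.length : Int) + 1) = 1 then
        if pvLastCheck adj_et end_set usedT' e2 then true
        else pvRunB adj_et adj_te end_set target_k fuel ((pend', back) :: rest)
               (PySem.Set.discard usedE' e2) (PySem.Set.discard usedT' t)
      else
        pvRunB adj_et adj_te end_set target_k fuel
          ((pvMovesB adj_et adj_te usedT' usedE' e2, some (t, e2)) :: (pend', back) :: rest)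
          usedE' usedT'

-- Fuel for pvRunB: an upper bound on the loop's iteration count (1 per move tried at every
-- level, counting full exploration with no early exit, plus 1 per frame pop).
def pvCostB (adj_et adj_te : List (Int × List Int)) :
    Nat → List Int → List Int → List (Int × Int) → Nat
  | _, _, _, [] => 1
  | 0, usedE, usedT, _ :: p => 1 + pvCostB adj_et adj_te 0 usedE usedT p
  | m+1, usedE, usedT, (t, e2) :: p =>
    1 + pvCostB adj_et adj_te m (PySem.Set.add usedE e2) (PySem.Set.add usedT t)
          (pvMovesB adj_et adj_te (PySem.Set.add usedT t) (PySem.Set.add usedE e2) e2)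
      + pvCostB adj_et adj_te (m+1) usedE usedT p
termination_by n _ _ pend => (n, pend.length)

def find_alternating_path_bt_alt (E_list : List Int) (T_list : List Int) (start_e : Int) (target_k : Int) (adj_et : List (Int × List Int)) (adj_te : List (Int × List Int)) (end_set : Option (List Int)) : Bool :=
  if target_k ≤ 0 then decide (target_k = 0)
  else if target_k = 1 then (PySem.Dict.getD ⟨adj_et⟩ start_e []).any (pvOkEnd end_set)
  else
    let pend0 := pvMovesB adj_et adj_te [] [start_e] start_e
    pvRunB adj_et adj_te end_set target_k
      (pvCostB adj_et adj_te (target_k - 2).toNat [start_e] [] pend0)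
      [(pend0, none)] [start_e] []

-- ===== PRECONDITION & SPEC =====
def Spec_find_alternating_path_bt (E_list : List Int) (T_list : List Int) (start_e : Int) (target_k : Int) (adj_et : List (Int × List Int)) (adj_te : List (Int × List Int)) (end_set : Option (List Int)) (out : Bool) : Prop := out = find_alternating_path_bt_alt E_list T_list start_e target_k adj_et adj_te end_set
instance (E_list : List Int) (T_list : List Int) (start_e : Int) (target_k : Int) (adj_et : List (Int × List Int)) (adj_te : List (Int × List Int)) (end_set : Option (List Int)) (out : Bool) : Decidable (Spec_find_alternating_path_bt E_list T_list start_e target_k adj_et adj_te end_set out) := by unfold Spec_find_alternating_path_bt; infer_instance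

-- ===== CLAIM (what is proved, stated in full; the proofs are below) =====
def Claim_equal_find_alternating_path_bt : Prop := ∀ (E_list : List Int) (T_list : List Int) (start_e : Int) (target_k : Int) (adj_et : List (Int × List Int)) (adj_te : List (Int × List Int)) (end_set : Option (List Int)), Dom_find_alternating_path_bt E_list T_list start_e target_k adj_et adj_te end_set → Spec_find_alternating_path_bt E_list T_list start_e target_k adj_et adj_te end_set (find_alternating_path_bt E_list T_list start_e target_k adj_et adj_te end_set)

-- ===== LEMMAS AND PROOFS =====

-- Functional form of A's backtracking (proof-side only): pvBtA with the SAME fuel.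
def pvSearchB (adj_et adj_te : List (Int × List Int)) (end_set : Option (List Int)) :
    Nat → Int → List Int → List Int → Int → Bool
  | 0, _, _, _, _ => false
  | fuel+1, k, pathE, pathT, e =>
    if k = 0 then true
    else
      let ts := (PySem.Dict.getD ⟨adj_et⟩ e []).filter (fun t => !pathT.contains t)
      if k = 1 then ts.any (fun t => pvOkEnd end_set t)
      else ts.any fun t =>
        (PySem.Dict.getD ⟨adj_te⟩ t []).any fun e2 =>
          if pathE.contains e2 then false
          else pvSearchB adj_et adj_te end_set fuel (k - 1) (pathE ++ [e2]) (pathT ++ [t]) e2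

-- Structured success predicate for a frame's move list (proof-side): index n means the
-- remaining number of half-steps AFTER taking a move from this list is n + 1.
def pvProcB (adj_et adj_te : List (Int × List Int)) (end_set : Option (List Int)) :
    Nat → List Int → List Int → List (Int × Int) → Bool
  | _, _, _, [] => false
  | 0, usedE, usedT, (t, e2) :: p =>
    if pvLastCheck adj_et end_set (PySem.Set.add usedT t) e2 then true
    else pvProcB adj_et adj_te end_set 0 usedE usedT p
  | m+1, usedE, usedT, (t, e2) :: p =>
    if pvProcB adj_et adj_te end_set m (PySem.Set.add usedE e2) (PySem.Set.add usedT t)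
         (pvMovesB adj_et adj_te (PySem.Set.add usedT t) (PySem.Set.add usedE e2) e2) then true
    else pvProcB adj_et adj_te end_set (m+1) usedE usedT p
termination_by n _ _ pend => (n, pend.length)

def pvSpecV (adj_et adj_te : List (Int × List Int)) (end_set : Option (List Int))
    (k : Int) (usedE usedT : List Int) (e : Int) : Bool :=
  if k = 1 then pvLastCheck adj_et end_set usedT e
  else pvProcB adj_et adj_te end_set (k - 2).toNat usedE usedT
         (pvMovesB adj_et adj_te usedT usedE e)

def pvSlack (teVals usedE : List Int) : Nat :=
  (teVals.filter (fun x => !usedE.contains x)).length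

lemma pv_list_any_congr {α : Type} (l : List α) (p q : α → Bool)
    (h : ∀ x ∈ l, p x = q x) : l.any p = l.any q := by
  induction l with
  | nil => rfl
  | cons a l ih =>
    simp only [List.any_cons, h a (by simp), ih (fun x hx => h x (by simp [hx]))]

lemma pv_any_filter {A : Type} (l : List A) (p q : A → Bool) :
    (l.filter p).any q = l.any (fun a => p a && q a) := by
  induction l with
  | nil => rfl
  | cons a l ih => cases h : p a <;> simp [List.filter_cons, h, ih]

lemma pv_any_map {A B : Type} (l : List A) (f : A → B) (p : B → Bool) :
    (l.map f).any p = l.any (fun a => p (f a)) := by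
  induction l <;> simp_all

lemma pv_any_flatMap {A B : Type} (l : List A) (f : A → List B) (p : B → Bool) :
    (l.flatMap f).any p = l.any (fun a => (f a).any p) := by
  induction l <;> simp_all

lemma pvDiscardAdd {s : List Int} {x : Int} (h : s.contains x = false) :
    PySem.Set.discard (PySem.Set.add s x) x = s := by
  have hx : x ∉ s := by simpa [List.contains_eq_mem] using h
  unfold PySem.Set.add PySem.Set.discard
  rw [if_neg (fun hh => hx (by simpa using hh))]
  rw [List.filter_append]
  have h2 : s.filter (fun y => !(y == x)) = s :=
    List.filter_eq_self.mpr (fun a ha => by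
      simp only [Bool.not_eq_eq_eq_not, Bool.not_true, beq_eq_false_iff_ne, ne_eq]
      exact fun e => hx (e ▸ ha))
  simpa [h2] using hx

lemma pvMem_movesB {adj_et adj_te : List (Int × List Int)} {usedT usedE : List Int} {e : Int}
    {t e2 : Int} (h : (t, e2) ∈ pvMovesB adj_et adj_te usedT usedE e) :
    usedT.contains t = false ∧ usedE.contains e2 = false := by
  simp only [pvMovesB, List.mem_flatMap] at h
  obtain ⟨t', _, hmem⟩ := h
  by_cases hc : usedT.contains t' = true
  · rw [if_pos hc] at hmem
    simp at hmem
  · rw [if_neg hc] at hmem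
    simp only [List.mem_map, List.mem_filter] at hmem
    obtain ⟨e2', ⟨_, he2⟩, heq⟩ := hmem
    injection heq with h1 h2
    subst h1; subst h2
    exact ⟨Bool.eq_false_iff.mpr hc, by simpa using he2⟩

lemma pvMem_getD_flatMap {l : List (Int × List Int)} {t x : Int}
    (h : x ∈ PySem.Dict.getD ⟨l⟩ t []) : x ∈ l.flatMap (fun p => p.2) := by
  induction l with
  | nil => simp [PySem.Dict.getD, PySem.Dict.get?] at h
  | cons a l ih =>
    rw [List.flatMap_cons, List.mem_append]
    by_cases hk : (a.1 == t) = true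
    · left
      simpa [PySem.Dict.getD, PySem.Dict.get?, List.find?, hk] using h
    · right
      exact ih (by simpa [PySem.Dict.getD, PySem.Dict.get?, List.find?, hk] using h)

lemma pvFilterLtOfMem {L : List Int} {p : Int → Bool} {x : Int}
    (hx : x ∈ L) (hp : p x = false) : (L.filter p).length < L.length := by
  induction L with
  | nil => simp at hx
  | cons a l ih =>
    rcases List.mem_cons.mp hx with rfl | hxl
    · have := l.length_filter_le p
      simp only [List.filter_cons, hp, Bool.false_eq_true, if_false, List.length_cons]
      omega
    · cases hv : p a <;> simp only [List.filter_cons, hv, Bool.false_eq_true, if_false, if_true,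
        List.length_cons] <;> [skip; skip] <;> (have := ih hxl; omega)

lemma pvSlack_append {teVals usedE : List Int} {x : Int}
    (hx : x ∈ teVals) (hc : usedE.contains x = false) :
    pvSlack teVals (usedE ++ [x]) < pvSlack teVals usedE := by
  unfold pvSlack
  have hsplit : teVals.filter (fun y => !(usedE ++ [x]).contains y)
      = (teVals.filter (fun y => !usedE.contains y)).filter (fun y => !(y == x)) := by
    rw [List.filter_filter]
    apply List.filter_congr
    intro a _
    by_cases h1 : a ∈ usedE <;> by_cases h2 : a = x <;>
      simp [List.contains_eq_mem, h1, h2]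
  rw [hsplit]
  apply pvFilterLtOfMem
  · exact List.mem_filter.mpr ⟨hx, by simpa [List.contains_eq_mem] using hc⟩
  · simp

lemma pvMovesB_any (adj_et adj_te : List (Int × List Int)) (uT uE : List Int) (e : Int)
    (G : Int × Int → Bool) :
    (pvMovesB adj_et adj_te uT uE e).any G
    = (PySem.Dict.getD ⟨adj_et⟩ e []).any (fun t =>
        !uT.contains t &&
          (PySem.Dict.getD ⟨adj_te⟩ t []).any (fun e2 => !uE.contains e2 && G (t, e2))) := by
  unfold pvMovesB
  rw [pv_any_flatMap]
  apply pv_list_any_congr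
  intro t _
  by_cases hct : uT.contains t = true
  · rw [if_pos hct, hct]
    simp
  · rw [if_neg hct, Bool.eq_false_iff.mpr hct, pv_any_map, pv_any_filter]
    simp

-- The machine simulation: with fuel = pvCostB + anything, running the top frame either
-- answers true exactly when pvProcB says so, or ends with the frame popped and its marks undone.
lemma pvRunB_sim (adj_et adj_te : List (Int × List Int)) (end_set : Option (List Int))
    (target_k : Int) :
    ∀ (n : Nat) (pend : List (Int × Int)) (usedE usedT : List Int)
      (back : Option (Int × Int)) (rest : List (List (Int × Int) × Option (Int × Int)))
      (fuel : Nat),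
      (∀ te ∈ pend, usedT.contains te.1 = false ∧ usedE.contains te.2 = false) →
      target_k = (rest.length : Int) + (n : Int) + 2 →
      pvRunB adj_et adj_te end_set target_k
        (pvCostB adj_et adj_te n usedE usedT pend + fuel) ((pend, back) :: rest) usedE usedT
      = (if pvProcB adj_et adj_te end_set n usedE usedT pend then true
         else pvRunB adj_et adj_te end_set target_k fuel rest
                (match back with | none => usedE | some (_, be) => PySem.Set.discard usedE be)
                (match back with | none => usedT | some (bt, _) => PySem.Set.discard usedT bt)) := by
  intro n
  induction n using Nat.strong_induction_on with
  | _ n ihn =>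
    intro pend
    induction pend with
    | nil =>
      intro usedE usedT back rest fuel hinv hn
      have hcost : pvCostB adj_et adj_te n usedE usedT [] = 1 := by
        cases n <;> simp [pvCostB]
      have hproc : pvProcB adj_et adj_te end_set n usedE usedT [] = false := by
        cases n <;> simp [pvProcB]
      rw [hcost, Nat.add_comm, hproc]
      cases back with
      | none => simp [pvRunB]
      | some b =>
        obtain ⟨bt, be⟩ := b
        simp [pvRunB]
    | cons te p ih =>
      obtain ⟨t, e2⟩ := te
      intro usedE usedT back rest fuel hinv hn
      have hfresh := hinv (t, e2) (List.mem_cons_self ..)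
      have hinvp : ∀ te ∈ p, usedT.contains te.1 = false ∧ usedE.contains te.2 = false :=
        fun te hte => hinv te (List.mem_cons_of_mem _ hte)
      cases n with
      | zero =>
        have hcond : target_k - ((rest.length : Int) + 1) = 1 := by
          push_cast at hn; omega
        have harr : pvCostB adj_et adj_te 0 usedE usedT ((t, e2) :: p) + fuel
            = (pvCostB adj_et adj_te 0 usedE usedT p + fuel) + 1 := by
          simp [pvCostB]; omega
        rw [harr]
        simp only [pvRunB, hcond, if_true]
        by_cases hl : pvLastCheck adj_et end_set (PySem.Set.add usedT t) e2 = true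
        · rw [if_pos hl]
          simp [pvProcB, hl]
        · rw [if_neg hl]
          rw [pvDiscardAdd hfresh.2, pvDiscardAdd hfresh.1]
          rw [ih usedE usedT back rest fuel hinvp hn]
          simp [pvProcB, hl]
      | succ m =>
        have hcond : ¬ (target_k - ((rest.length : Int) + 1) = 1) := by
          push_cast at hn; omega
        have harr : pvCostB adj_et adj_te (m+1) usedE usedT ((t, e2) :: p) + fuel
            = (pvCostB adj_et adj_te m (PySem.Set.add usedE e2) (PySem.Set.add usedT t)
                 (pvMovesB adj_et adj_te (PySem.Set.add usedT t) (PySem.Set.add usedE e2) e2)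
               + (pvCostB adj_et adj_te (m+1) usedE usedT p + fuel)) + 1 := by
          simp [pvCostB]; omega
        rw [harr]
        simp only [pvRunB]
        rw [if_neg hcond]
        rw [ihn m (Nat.lt_succ_self m)
            (pvMovesB adj_et adj_te (PySem.Set.add usedT t) (PySem.Set.add usedE e2) e2)
            (PySem.Set.add usedE e2) (PySem.Set.add usedT t) (some (t, e2)) ((p, back) :: rest)
            (pvCostB adj_et adj_te (m+1) usedE usedT p + fuel)
            (fun te hte => pvMem_movesB hte)
            (by simp only [List.length_cons]; push_cast at hn ⊢; omega)]
        simp only [pvDiscardAdd hfresh.2, pvDiscardAdd hfresh.1]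
        by_cases hcl : pvProcB adj_et adj_te end_set m (PySem.Set.add usedE e2)
            (PySem.Set.add usedT t)
            (pvMovesB adj_et adj_te (PySem.Set.add usedT t) (PySem.Set.add usedE e2) e2) = true
        · rw [if_pos hcl]
          simp [pvProcB, hcl]
        · rw [if_neg hcl]
          rw [ih usedE usedT back rest fuel hinvp hn]
          simp [pvProcB, hcl]

-- A's functional form is false for negative k (it can never reach the base cases).
lemma pvSearchB_neg (adj_et adj_te : List (Int × List Int)) (end_set : Option (List Int)) :
    ∀ (fuel : Nat) (k : Int) (uE uT : List Int) (e : Int), k < 0 →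
      pvSearchB adj_et adj_te end_set fuel k uE uT e = false := by
  intro fuel
  induction fuel with
  | zero => intro k uE uT e hk; simp [pvSearchB]
  | succ fuel ih =>
    intro k uE uT e hk
    have h0 : ¬ k = 0 := by omega
    have h1 : ¬ k = 1 := by omega
    simp only [pvSearchB, h0, h1, if_false]
    refine List.any_eq_false.mpr ?_
    intro t ht
    rw [Bool.not_eq_true]
    refine List.any_eq_false.mpr ?_
    intro e2 he2
    by_cases hc : e2 ∈ uE
    · simp [hc]
    · simp [hc, ih (k - 1) (uE ++ [e2]) (uT ++ [t]) e2 (by omega)]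

-- pvProcB over a move list is an `any` of its per-move outcome.
lemma pvProcB_any (adj_et adj_te : List (Int × List Int)) (end_set : Option (List Int)) :
    ∀ (n : Nat) (uE uT : List Int) (pend : List (Int × Int)),
      pvProcB adj_et adj_te end_set n uE uT pend
      = pend.any (fun te =>
          match n with
          | 0 => pvLastCheck adj_et end_set (PySem.Set.add uT te.1) te.2
          | m+1 => pvProcB adj_et adj_te end_set m (PySem.Set.add uE te.2) (PySem.Set.add uT te.1)
                     (pvMovesB adj_et adj_te (PySem.Set.add uT te.1) (PySem.Set.add uE te.2) te.2)) := by
  intro n uE uT pend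
  induction pend with
  | nil => cases n <;> simp [pvProcB]
  | cons te p ih =>
    obtain ⟨t, e2⟩ := te
    cases n with
    | zero =>
      by_cases h : pvLastCheck adj_et end_set (PySem.Set.add uT t) e2 <;>
        simp [pvProcB, h, ih]
    | succ m =>
      by_cases h : pvProcB adj_et adj_te end_set m (PySem.Set.add uE e2) (PySem.Set.add uT t)
          (pvMovesB adj_et adj_te (PySem.Set.add uT t) (PySem.Set.add uE e2) e2) <;>
        simp [pvProcB, h, ih]

-- With sufficient fuel (strictly more than the number of adj_te values outside usedE),
-- A's functional form computes the total spec pvSpecV.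
lemma pvSearchB_spec (adj_et adj_te : List (Int × List Int)) (end_set : Option (List Int)) :
    ∀ (fuel : Nat) (k : Int) (uE uT : List Int) (e : Int), 1 ≤ k →
      pvSlack (adj_te.flatMap (fun p => p.2)) uE < fuel →
      pvSearchB adj_et adj_te end_set fuel k uE uT e = pvSpecV adj_et adj_te end_set k uE uT e := by
  intro fuel
  induction fuel with
  | zero => intro k uE uT e hk hs; omega
  | succ fuel ih =>
    intro k uE uT e hk hs
    by_cases hk1 : k = 1
    · subst hk1
      simp only [pvSearchB, pvSpecV, pvLastCheck, one_ne_zero, if_false, if_true, reduceCtorEq]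
      rw [pv_any_filter]
    · have h0 : ¬ k = 0 := by omega
      simp only [pvSearchB]
      rw [if_neg h0, if_neg hk1]
      unfold pvSpecV
      rw [if_neg hk1]
      rw [pvProcB_any, pvMovesB_any, pv_any_filter]
      apply pv_list_any_congr
      intro t0 ht0
      by_cases hct : uT.contains t0 = true
      · rw [hct]
        simp
      · have hct' : uT.contains t0 = false := Bool.eq_false_iff.mpr hct
        have hctm : t0 ∉ uT := by simpa [List.contains_eq_mem] using hct'
        rw [hct']
        simp only [Bool.not_false, Bool.true_and]
        apply pv_list_any_congr
        intro e2 he2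
        by_cases hce : uE.contains e2 = true
        · rw [if_pos hce, hce]
          simp
        · have hce' : uE.contains e2 = false := Bool.eq_false_iff.mpr hce
          have hcem : e2 ∉ uE := by simpa [List.contains_eq_mem] using hce'
          rw [if_neg hce, hce']
          simp only [Bool.not_false, Bool.true_and]
          have hmemv : e2 ∈ adj_te.flatMap (fun p => p.2) := pvMem_getD_flatMap he2
          have hsl : pvSlack (adj_te.flatMap (fun p => p.2)) (uE ++ [e2]) < fuel := by
            have := pvSlack_append hmemv hce'
            omega
          rw [ih (k - 1) (uE ++ [e2]) (uT ++ [t0]) e2 (by omega) hsl]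
          have haddT : PySem.Set.add uT t0 = uT ++ [t0] := by
            simp [PySem.Set.add, hctm]
          have haddE : PySem.Set.add uE e2 = uE ++ [e2] := by
            simp [PySem.Set.add, hcem]
          unfold pvSpecV
          by_cases hk2e : k = 2
          · have htn0 : (k - 2).toNat = 0 := by omega
            rw [htn0, if_pos (by omega : k - 1 = 1), haddT]
          · have htn : (k - 2).toNat = (k - 3).toNat + 1 := by omega
            have htn2 : (k - 1 - 2).toNat = (k - 3).toNat := by omega
            rw [htn, if_neg (by omega : ¬ k - 1 = 1), htn2, haddT, haddE]

-- A's port equals its functional form at the same fuel (no sufficiency needed: aligned fuel).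
lemma pvLoopE_eq (adj_et adj_te : List (Int × List Int)) (end_set : Option (List Int))
    (target_k : Int) (fuel : Nat)
    (IH : ∀ usedE usedT e d, pvBtA adj_et adj_te end_set target_k fuel usedE usedT e d
          = pvSearchB adj_et adj_te end_set fuel (target_k - d) usedE usedT e)
    (usedE usedT' : List Int) (d : Int) :
    ∀ es : List Int,
      pvLoopE adj_et adj_te end_set target_k fuel usedE usedT' d es
      = es.any (fun e2 =>
          if usedE.contains e2 then false
          else pvSearchB adj_et adj_te end_set fuel (target_k - d - 1) (usedE ++ [e2]) usedT' e2) := by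
  intro es
  induction es with
  | nil => simp [pvLoopE]
  | cons e es ih =>
    by_cases he : e ∈ usedE
    · simp [pvLoopE, he, ih]
    · have hadd : PySem.Set.add usedE e = usedE ++ [e] := by
        simp [PySem.Set.add, he]
      have harith : target_k - (d + 1) = target_k - d - 1 := by ring
      simp only [pvLoopE, List.any_cons, ih, IH, hadd, harith,
        List.contains_eq_mem, he, decide_false, Bool.not_false, Bool.true_and,
        Bool.false_eq_true, if_false]
      cases pvSearchB adj_et adj_te end_set fuel (target_k - d - 1) (usedE ++ [e]) usedT' e <;> simp

lemma pvLoopT_eq (adj_et adj_te : List (Int × List Int)) (end_set : Option (List Int))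
    (target_k : Int) (fuel : Nat)
    (IH : ∀ usedE usedT e d, pvBtA adj_et adj_te end_set target_k fuel usedE usedT e d
          = pvSearchB adj_et adj_te end_set fuel (target_k - d) usedE usedT e)
    (usedE usedT : List Int) (d : Int) :
    ∀ ts : List Int,
      pvLoopT adj_et adj_te end_set target_k fuel usedE usedT d ts
      = (if target_k - d = 1
         then (ts.filter (fun t => !usedT.contains t)).any (fun t => pvOkEnd end_set t)
         else (ts.filter (fun t => !usedT.contains t)).any (fun t =>
            (PySem.Dict.getD ⟨adj_te⟩ t []).any (fun e2 =>
              if usedE.contains e2 then false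
              else pvSearchB adj_et adj_te end_set fuel (target_k - d - 1)
                     (usedE ++ [e2]) (usedT ++ [t]) e2))) := by
  intro ts
  induction ts with
  | nil => simp [pvLoopT]
  | cons t ts ih =>
    by_cases ht : t ∈ usedT
    · simp [pvLoopT, ht, ih]
    · by_cases hd : target_k - d = 1
      · have hd' : d = target_k - 1 := by omega
        subst hd'
        have harr : target_k - (target_k - 1) = 1 := by ring
        cases hend : pvEndBlocks end_set t with
        | true =>
          have hok : pvOkEnd end_set t = false := by
            cases end_set <;> simp_all [pvEndBlocks, pvOkEnd]
          simp [pvLoopT, ht, hend, ih, harr, hok]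
        | false =>
          have hok : pvOkEnd end_set t = true := by
            cases end_set <;> simp_all [pvEndBlocks, pvOkEnd]
          simp [pvLoopT, ht, hend, harr, hok]
      · have hd' : ¬ d = target_k - 1 := by omega
        have hadd : PySem.Set.add usedT t = usedT ++ [t] := by
          simp [PySem.Set.add, ht]
        have hE := pvLoopE_eq adj_et adj_te end_set target_k fuel IH usedE
          (PySem.Set.add usedT t) d (PySem.Dict.getD ⟨adj_te⟩ t [])
        rw [hadd] at hE
        simp [pvLoopT, ht, hd', hd, hE, ih]
        congr 1
        rw [Bool.eq_iff_iff]
        simp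

lemma pvMain_eq (adj_et adj_te : List (Int × List Int)) (end_set : Option (List Int))
    (target_k : Int) :
    ∀ (fuel : Nat) (usedE usedT : List Int) (e d : Int),
      pvBtA adj_et adj_te end_set target_k fuel usedE usedT e d
      = pvSearchB adj_et adj_te end_set fuel (target_k - d) usedE usedT e := by
  intro fuel
  induction fuel with
  | zero => intro usedE usedT e d; simp [pvBtA, pvSearchB]
  | succ fuel ih =>
    intro usedE usedT e d
    have hT := pvLoopT_eq adj_et adj_te end_set target_k fuel ih usedE usedT d
      (PySem.Dict.getD ⟨adj_et⟩ e [])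
    by_cases hd : d = target_k
    · simp [pvBtA, pvSearchB, hd]
    · have hk0 : ¬ target_k - d = 0 := by omega
      simp [pvBtA, pvSearchB, hd, hk0, hT]

-- ===== VERDICT (by name: the statement is the Claim_ definition above) =====
theorem find_alternating_path_bt_spec : Claim_equal_find_alternating_path_bt := by
  intro E_list T_list start_e target_k adj_et adj_te end_set _
  unfold Spec_find_alternating_path_bt find_alternating_path_bt
  simp only [find_alternating_path_bt_alt]
  have hA := pvMain_eq adj_et adj_te end_set target_k
    ((adj_te.flatMap (fun p => p.2)).length + 1) [start_e] [] start_e 0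
  rw [sub_zero] at hA
  rw [hA]
  by_cases h0 : target_k ≤ 0
  · rw [if_pos h0]
    by_cases hz : target_k = 0
    · subst hz; simp [pvSearchB]
    · rw [pvSearchB_neg adj_et adj_te end_set _ target_k [start_e] [] start_e (by omega)]
      simp [hz]
  · rw [if_neg h0]
    have hslack : pvSlack (adj_te.flatMap (fun p => p.2)) [start_e]
        < (adj_te.flatMap (fun p => p.2)).length + 1 := by
      have := List.length_filter_le (fun x => !([start_e] : List Int).contains x)
        (adj_te.flatMap (fun p => p.2))
      unfold pvSlack; omega
    by_cases h1 : target_k = 1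
    · subst h1
      rw [pvSearchB_spec adj_et adj_te end_set _ 1 [start_e] [] start_e (by omega) hslack]
      rw [if_pos rfl]
      unfold pvSpecV
      rw [if_pos rfl]
      unfold pvLastCheck
      simp
    · rw [if_neg h1]
      rw [pvSearchB_spec adj_et adj_te end_set _ target_k [start_e] [] start_e (by omega) hslack]
      unfold pvSpecV
      rw [if_neg h1]
      have hsim := pvRunB_sim adj_et adj_te end_set target_k (target_k - 2).toNat
        (pvMovesB adj_et adj_te [] [start_e] start_e) [start_e] [] none [] 0
        (fun te hte => pvMem_movesB hte)
        (by
          have h2 : ((target_k - 2).toNat : Int) = target_k - 2 := Int.toNat_of_nonneg (by omega)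
          simp only [List.length_nil, Nat.cast_zero, h2]
          omega)
      rw [Nat.add_zero] at hsim
      rw [hsim]
      by_cases hp : pvProcB adj_et adj_te end_set (target_k - 2).toNat [start_e] []
          (pvMovesB adj_et adj_te [] [start_e] start_e) = true
      · simp [hp]
      · simp [pvRunB, hp]
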